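-- pv_equiv track=rewrite | github.com/blegloannec/CodeProblems | CodeJam/19/19.1B.A.Manhattan_Crepe_Cart.py | best_coord
-- ===== SOURCE A (Python) =====
-- def best_coord(A):
--     CurrVal = sum(int(d==-1) for _,d in A)
--     MaxPos, MaxVal = 0, CurrVal
--     i = 0
--     while i<len(A):
--         CurrPos = A[i][0]
--         CurrVal += A[i][1]
--         i += 1
--         while i<len(A) and A[i][0]==CurrPos:
--             CurrVal += A[i][1]
--             i += 1
--         if CurrVal>MaxVal:
--             MaxPos, MaxVal = CurrPos, CurrVal
--     return MaxPos
-- ===== SOURCE B (Python) =====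
-- def best_coord(A):
--     # Backward sweep: keep the leftmost-max candidate of the suffix with its
--     # value measured relative to the suffix start; the baseline L cancels out,
--     # so it is never computed.  Answer beats the position-0 sentinel iff the
--     # relative value is strictly positive.
--     best = None          # (position, value relative to current suffix start)
--     nextp = None         # coordinate of the element just to the right
--     for i in range(len(A) - 1, -1, -1):
--         p, d = A[i]
--         if best is not None:
--             best = (best[0], best[1] + d)
--         if nextp != p and (best is None or d >= best[1]):
--             best = (p, d)
--         nextp = p
--     return best[0] if best is not None and best[1] > 0 else 0
-- ===== Notes on version B (the rewrite author's own statement) =====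
-- stated objective: alternative
-- what changed: B scans the list backwards, maintaining the leftmost-maximal run-end candidate with its value relative to the current suffix start, so the left-mover baseline L cancels and is never computed; A sweeps forward with a running absolute value and running maximum.
import Mathlib
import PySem

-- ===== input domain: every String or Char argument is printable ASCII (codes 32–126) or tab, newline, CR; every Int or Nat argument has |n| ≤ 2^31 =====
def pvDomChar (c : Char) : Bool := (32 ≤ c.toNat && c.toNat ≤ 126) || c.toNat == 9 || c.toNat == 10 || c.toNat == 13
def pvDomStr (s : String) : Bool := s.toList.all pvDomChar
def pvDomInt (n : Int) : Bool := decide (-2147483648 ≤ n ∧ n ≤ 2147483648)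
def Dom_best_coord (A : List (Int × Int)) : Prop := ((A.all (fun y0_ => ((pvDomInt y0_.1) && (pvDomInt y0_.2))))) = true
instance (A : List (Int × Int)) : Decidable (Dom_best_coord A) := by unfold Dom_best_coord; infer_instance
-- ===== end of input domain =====

-- B replaces A's forward sweep (running absolute value + running maximum) by a backward
-- sweep keeping the leftmost-max run-end candidate at a value relative to the suffix
-- start, so the baseline L is never computed.  Alternative decomposition, same cost.

-- ===== PORT A =====
-- inner while: consume successive elements whose first component equals `pos`, accumulating CurrVal
def bcInner (pos : Int) : List (Int × Int) → Int → Int × List (Int × Int)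
  | [], cv => (cv, [])
  | (q, d) :: t, cv => if q = pos then bcInner pos t (cv + d) else (cv, (q, d) :: t)

theorem bcInner_len (pos : Int) : ∀ (l : List (Int × Int)) (cv : Int),
    (bcInner pos l cv).2.length ≤ l.length := by
  intro l
  induction l with
  | nil => intro cv; simp [bcInner]
  | cons h t ih =>
    intro cv
    simp only [bcInner]
    split
    · exact le_trans (ih _) (Nat.le_succ _)
    · simp

-- outer while over the remaining list, with CurrVal / MaxPos / MaxVal as state
def bcOuter : List (Int × Int) → Int → Int → Int → Int
  | [], _, mp, _ => mp
  | (p, d) :: t, cv, mp, mv =>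
    let r := bcInner p t (cv + d)
    if r.1 > mv then bcOuter r.2 r.1 p r.1 else bcOuter r.2 r.1 mp mv
  termination_by l => l.length
  decreasing_by
  · exact Nat.lt_succ_of_le (bcInner_len p t (cv + d))
  · exact Nat.lt_succ_of_le (bcInner_len p t (cv + d))

def best_coord (A : List (Int × Int)) : Int :=
  let currVal := A.foldl (fun acc pd => if pd.2 = -1 then acc + 1 else acc) 0
  bcOuter A currVal 0 currVal

-- ===== PORT B =====
-- backward sweep (structural recursion = Source B's right-to-left loop): best run-end
-- candidate of the suffix, value relative to the suffix start; `nextp` check becomes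
-- a look at the tail's head.
def bcBack : List (Int × Int) → Option (Int × Int)
  | [] => none
  | (p, d) :: t =>
    let best := (bcBack t).map (fun b => (b.1, b.2 + d))
    let runEnd : Bool := match t with | [] => true | (q, _) :: _ => q ≠ p
    if runEnd then
      match best with
      | none => some (p, d)
      | some (bp, bv) => if d ≥ bv then some (p, d) else some (bp, bv)
    else best

def best_coord_alt (A : List (Int × Int)) : Int :=
  match bcBack A with
  | some (bp, bv) => if bv > 0 then bp else 0
  | none => 0

-- ===== PRECONDITION & SPEC =====
def Spec_best_coord (A : List (Int × Int)) (out : Int) : Prop := out = best_coord_alt A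
instance (A : List (Int × Int)) (out : Int) : Decidable (Spec_best_coord A out) := by unfold Spec_best_coord; infer_instance

-- ===== CLAIM =====
def Claim_equal_best_coord : Prop := ∀ (A : List (Int × Int)), Dom_best_coord A → Spec_best_coord A (best_coord A)

-- ===== LEMMAS AND PROOFS =====

-- proof-only: the value A's loop ends with, as a function of B's backward best
def backVal (o : Option (Int × Int)) (cv mp mv : Int) : Int :=
  match o with
  | none => mp
  | some (bp, bv) => if cv + bv > mv then bp else mp

theorem bcBack_single (p d : Int) : bcBack [(p, d)] = some (p, d) := by
  simp [bcBack]

theorem bcBack_same (p d e : Int) (t : List (Int × Int)) :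
    bcBack ((p, d) :: (p, e) :: t) = (bcBack ((p, e) :: t)).map (fun b => (b.1, b.2 + d)) := by
  conv_lhs => rw [bcBack]
  simp

theorem bcBack_diff (p d q e : Int) (t : List (Int × Int)) (hq : q ≠ p) :
    bcBack ((p, d) :: (q, e) :: t) =
      match (bcBack ((q, e) :: t)).map (fun b => (b.1, b.2 + d)) with
      | none => some (p, d)
      | some (bp, bv) => if d ≥ bv then some (p, d) else some (bp, bv) := by
  conv_lhs => rw [bcBack]
  simp [hq]

-- when the next element continues the run, A's outer step is absorbed into bcInner
theorem bcOuter_same (p d e : Int) (t : List (Int × Int)) (cv mp mv : Int) :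
    bcOuter ((p, d) :: (p, e) :: t) cv mp mv = bcOuter ((p, e) :: t) (cv + d) mp mv := by
  simp only [bcOuter]
  simp [bcInner, add_assoc]

-- when the run ends at the head, bcInner returns immediately
theorem bcOuter_end (p d : Int) (t : List (Int × Int)) (cv mp mv : Int)
    (h : bcInner p t (cv + d) = (cv + d, t)) :
    bcOuter ((p, d) :: t) cv mp mv =
      if cv + d > mv then bcOuter t (cv + d) p (cv + d) else bcOuter t (cv + d) mp mv := by
  rw [bcOuter, h]

-- the main bridge: A's loop result expressed through B's backward best
theorem bcOuter_eq_back : ∀ (l : List (Int × Int)) (cv mp mv : Int),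
    bcOuter l cv mp mv = backVal (bcBack l) cv mp mv := by
  intro l
  induction l with
  | nil => intro cv mp mv; simp [bcOuter, bcBack, backVal]
  | cons h t ih =>
    obtain ⟨p, d⟩ := h
    intro cv mp mv
    match t with
    | [] =>
      have hend : bcInner p [] (cv + d) = (cv + d, []) := by simp [bcInner]
      rw [bcOuter_end p d [] cv mp mv hend, bcBack_single]
      simp only [bcOuter, backVal]
    | (q, e) :: t' =>
      by_cases hq : q = p
      · subst hq
        rw [bcOuter_same, ih, bcBack_same]
        cases hb : bcBack ((q, e) :: t') with
        | none => simp [backVal]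
        | some b =>
          obtain ⟨bp, bv⟩ := b
          simp only [Option.map_some, backVal]
          split_ifs <;> omega
      · have hend : bcInner p ((q, e) :: t') (cv + d) = (cv + d, (q, e) :: t') := by
          simp [bcInner, hq]
        rw [bcOuter_end p d _ cv mp mv hend, ih, ih, bcBack_diff p d q e t' hq]
        cases hb : bcBack ((q, e) :: t') with
        | none =>
          simp only [Option.map_none, backVal]
        | some b =>
          obtain ⟨bp, bv⟩ := b
          simp only [Option.map_some]
          by_cases hge : d ≥ bv + d
          · rw [if_pos hge]
            simp only [backVal]
            split_ifs <;> omega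
          · rw [if_neg hge]
            simp only [backVal]
            split_ifs <;> omega

-- ===== VERDICT =====
theorem best_coord_spec : Claim_equal_best_coord := by
  intro A _
  unfold Spec_best_coord best_coord best_coord_alt
  rw [bcOuter_eq_back]
  cases hb : bcBack A with
  | none => rfl
  | some b =>
    obtain ⟨bp, bv⟩ := b
    simp only [backVal]
    split_ifs <;> omega
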